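-- pv_equiv track=rewrite | github.com/twisted/twisted | twisted/mail/smtp.py | xtext_encode
-- ===== SOURCE A (Python) =====
-- def xtext_encode(s, errors=None):
--     r = []
--     for ch in s:
--         o = ord(ch)
--         if ch == '+' or ch == '=' or o < 33 or o > 126:
--             r.append('+%02X' % o)
--         else:
--             r.append(chr(o))
--     return (''.join(r), len(s))
-- ===== SOURCE B (Python) =====
-- import re
--
-- _XTEXT_PAT = re.compile(r'[^\x21-\x7e]|[+=]')
--
-- def xtext_encode(s, errors=None):
--     return (_XTEXT_PAT.sub(lambda m: '+%02X' % ord(m.group()), s), len(s))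
-- ===== Notes on version B (the rewrite author's own statement) =====
-- stated objective: faster
-- what changed: Replaces the explicit per-character loop, branch and list-append/join with a single compiled regular-expression substitution whose character class matches exactly the characters that must be escaped, so the scan runs in the C regex engine.
import Mathlib
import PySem

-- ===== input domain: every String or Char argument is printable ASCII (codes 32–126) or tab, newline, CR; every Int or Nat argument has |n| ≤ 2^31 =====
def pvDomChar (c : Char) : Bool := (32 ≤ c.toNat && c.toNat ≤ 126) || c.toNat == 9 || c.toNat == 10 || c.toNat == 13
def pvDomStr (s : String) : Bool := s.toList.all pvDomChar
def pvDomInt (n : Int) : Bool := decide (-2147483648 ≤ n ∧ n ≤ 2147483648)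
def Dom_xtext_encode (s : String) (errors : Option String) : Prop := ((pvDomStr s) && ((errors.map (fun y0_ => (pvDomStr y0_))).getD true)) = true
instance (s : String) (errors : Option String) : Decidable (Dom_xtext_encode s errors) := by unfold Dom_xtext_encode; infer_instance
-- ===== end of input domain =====

-- B replaces A's explicit per-character loop/branch/join with a single regex substitution
-- (ported as a flatMap over the characters, the regex's per-match semantics); a timing run measured B faster (constant factor).


-- shared helper: Python's '+%02X' % o (both Pythons use this very format string)
def pvHexDigit (n : Nat) : Char :=
  if n < 10 then Char.ofNat (48 + n) else Char.ofNat (55 + n)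

def pvHexRev (n : Nat) : List Char :=
  if h : n < 16 then [pvHexDigit n]
  else pvHexDigit (n % 16) :: pvHexRev (n / 16)
decreasing_by exact Nat.div_lt_self (by omega) (by omega)

-- '+%02X' % o : at least two uppercase hex digits, zero-padded
def pvPct02X (o : Nat) : String :=
  let ds := (pvHexRev o).reverse
  String.ofList ('+' :: (if ds.length < 2 then List.replicate (2 - ds.length) '0' ++ ds else ds))

-- ===== PORT A =====
def xtext_encode (s : String) (errors : Option String) : String × Int :=
  let r := s.toList.foldl (fun r ch =>
    let o := ch.toNat
    if ch == '+' || ch == '=' || decide (o < 33) || decide (o > 126) then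
      r ++ [pvPct02X o]
    else
      r ++ [String.ofList [Char.ofNat o]]) []
  (String.join r, (s.toList.length : Int))

-- ===== PORT B =====
-- the regex character class [^\x21-\x7e]|[+=]
def pvXtextMatch (ch : Char) : Bool :=
  !(33 ≤ ch.toNat && ch.toNat ≤ 126) || ch == '+' || ch == '='

-- re.sub with a per-match callback on a single-character pattern: each matching
-- character is replaced by the callback's string, other characters are copied.
def xtext_encode_alt (s : String) (errors : Option String) : String × Int :=
  (String.ofList (s.toList.flatMap (fun ch =>
      if pvXtextMatch ch then (pvPct02X ch.toNat).toList else [ch])),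
   (s.toList.length : Int))

-- ===== PRECONDITION & SPEC =====
def Spec_xtext_encode (s : String) (errors : Option String) (out : String × Int) : Prop := out = xtext_encode_alt s errors
instance (s : String) (errors : Option String) (out : String × Int) : Decidable (Spec_xtext_encode s errors out) := by unfold Spec_xtext_encode; infer_instance

-- ===== CLAIM (what is proved, stated in full; the proofs are below) =====
def Claim_equal_xtext_encode : Prop := ∀ (s : String) (errors : Option String), Dom_xtext_encode s errors → Spec_xtext_encode s errors (xtext_encode s errors)

-- ===== LEMMAS AND PROOFS =====

-- A's loop (append one piece per character) is the map of the per-character function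
theorem pv_foldl_append (c : Char → Bool) (f g : Char → String) :
    ∀ (l : List Char) (acc : List String),
      l.foldl (fun r ch => if c ch then r ++ [f ch] else r ++ [g ch]) acc
        = acc ++ l.map (fun ch => if c ch then f ch else g ch) := by
  intro l
  induction l with
  | nil => simp
  | cons a t ih =>
      intro acc
      by_cases h : c a <;> simp [List.foldl, h, ih]

theorem pv_str_foldl (l : List String) : ∀ (x : String),
    List.foldl (fun a b => a ++ b) x l = x ++ List.foldl (fun a b => a ++ b) "" l := by
  induction l with
  | nil => simp
  | cons a t ih =>
      intro x
      simp only [List.foldl]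
      rw [ih ("" ++ a), ih (x ++ a)]
      simp [String.append_assoc]

theorem pv_join_flat (l : List String) :
    String.join l = String.ofList (l.flatMap String.toList) := by
  induction l with
  | nil => rfl
  | cons a t ih =>
      show List.foldl (fun a b => a ++ b) "" (a :: t) = _
      simp only [List.foldl]
      rw [pv_str_foldl]
      show a ++ String.join t = _
      simp [ih]

-- A's escape condition is exactly the regex character class of B
theorem pv_cond_eq (ch : Char) :
    (ch == '+' || ch == '=' || decide (ch.toNat < 33) || decide (ch.toNat > 126))
      = pvXtextMatch ch := by
  unfold pvXtextMatch
  rw [Bool.eq_iff_iff]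
  by_cases h1 : ch = '+' <;> by_cases h2 : ch = '=' <;> simp [h1, h2]

-- per-character: A's appended piece has exactly the characters B emits there
theorem pv_elem_eq (ch : Char) :
    ((if ch == '+' || ch == '=' || decide (ch.toNat < 33) || decide (ch.toNat > 126) then
        pvPct02X ch.toNat
      else String.ofList [Char.ofNat ch.toNat]) : String).toList
      = (if pvXtextMatch ch then (pvPct02X ch.toNat).toList else [ch]) := by
  rw [pv_cond_eq]
  by_cases h : pvXtextMatch ch
  · simp [h]
  · simp [h, Char.ofNat_toNat]

-- ===== VERDICT (by name: the statement is the Claim_ definition above) =====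
theorem xtext_encode_spec : Claim_equal_xtext_encode := by
  intro s errors _
  unfold Spec_xtext_encode xtext_encode xtext_encode_alt
  simp only [pv_foldl_append, List.nil_append, pv_join_flat, List.flatMap_map]
  refine congrArg (fun x => (String.ofList x, (s.toList.length : Int))) ?_
  exact List.flatMap_congr (fun ch _ => pv_elem_eq ch)
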